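-- pv_equiv track=rewrite | github.com/iman-noroozi/sitebuilder | quantum_resistant_security.py | _vector_matrix_multiply
-- ===== SOURCE A (Python) =====
-- from typing import Dict, List, Optional, Any, Tuple, Union
--
-- def _vector_matrix_multiply(vector: List[int], matrix: List[List[int]]) -> List[int]:
--     """Multiply vector by matrix"""
--     result = []
--     for col in range(len(matrix[0])):
--         val = 0
--         for row in range(len(vector)):
--             val ^= vector[row] & matrix[row][col]
--         result.append(val)
--     return result
-- ===== SOURCE B (Python) =====
-- def _vector_matrix_multiply(vector, matrix):
--     """Multiply vector by matrix (divide-and-conquer: mask one row, XOR-combine halves)"""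
--     width = len(matrix[0])
--     if width == 0:
--         return []
--
--     def solve(lo, hi):
--         # contribution of rows lo..hi-1 to the product, as a width-long vector
--         if hi - lo == 0:
--             return [0] * width
--         if hi - lo == 1:
--             v = vector[lo]
--             row = matrix[lo]
--             return [v & row[c] for c in range(width)]
--         mid = (lo + hi) // 2
--         return [x ^ y for x, y in zip(solve(lo, mid), solve(mid, hi))]
--
--     return solve(0, len(vector))
-- ===== Notes on version B (the rewrite author's own statement) =====
-- stated objective: alternative
-- what changed: B computes the GF(2) product by divide-and-conquer on the rows: a single row's masked contribution in the base case, recursively XOR-combining the two halves' whole vectors elementwise, instead of A's column-at-a-time nested loops; correct because XOR is associative and commutative with identity 0.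
import Mathlib
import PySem

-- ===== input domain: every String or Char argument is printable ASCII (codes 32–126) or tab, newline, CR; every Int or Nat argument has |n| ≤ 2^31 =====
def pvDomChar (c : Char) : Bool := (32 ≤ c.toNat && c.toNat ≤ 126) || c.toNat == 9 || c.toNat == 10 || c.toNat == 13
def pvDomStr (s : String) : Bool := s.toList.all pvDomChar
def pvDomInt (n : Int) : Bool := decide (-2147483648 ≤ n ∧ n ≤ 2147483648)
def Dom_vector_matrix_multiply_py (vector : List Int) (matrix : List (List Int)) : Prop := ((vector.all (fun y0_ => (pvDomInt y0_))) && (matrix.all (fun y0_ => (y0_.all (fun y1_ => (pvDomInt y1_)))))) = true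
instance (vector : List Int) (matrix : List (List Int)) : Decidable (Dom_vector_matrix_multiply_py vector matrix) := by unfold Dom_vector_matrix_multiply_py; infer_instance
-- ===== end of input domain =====

-- B replaces A's column-at-a-time nested loops with divide-and-conquer on the rows
-- (mask one row in the base case, XOR-combine halves elementwise); same cost, different
-- algorithm shape. Equivalence is proved on Pre_ (where Python A returns, not raises).

-- ===== PORT A =====
-- All list indices A uses come from range(len(..)), hence nonnegative and (inside Pre_)
-- in range, so List.getD is exact for Python's indexing there; matrix.headD [] is matrix[0]
-- (inside Pre_ the matrix is nonempty).
def vector_matrix_multiply_py (vector : List Int) (matrix : List (List Int)) : List Int :=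
  (List.range (matrix.headD []).length).map (fun col =>
    (List.range vector.length).foldl
      (fun val row => PySem.Int.bxor val (PySem.Int.band (vector.getD row 0) ((matrix.getD row []).getD col 0))) 0)

-- ===== PORT B =====
-- Source B's inner solve(lo, hi): contribution of rows lo..hi-1, recursion on hi - lo.
def pvSolve (vector : List Int) (matrix : List (List Int)) (width lo hi : Nat) : List Int :=
  if hi - lo = 0 then List.replicate width 0
  else if hi - lo = 1 then
    (List.range width).map (fun c => PySem.Int.band (vector.getD lo 0) ((matrix.getD lo []).getD c 0))
  else
    List.zipWith (fun x y => PySem.Int.bxor x y)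
      (pvSolve vector matrix width lo ((lo + hi) / 2))
      (pvSolve vector matrix width ((lo + hi) / 2) hi)
termination_by hi - lo
decreasing_by all_goals omega

def vector_matrix_multiply_py_alt (vector : List Int) (matrix : List (List Int)) : List Int :=
  let width := (matrix.headD []).length
  if width = 0 then []
  else pvSolve vector matrix width 0 vector.length

-- ===== PRECONDITION & SPEC =====
-- Pre_: exactly the inputs where Python A returns normally: matrix nonempty (matrix[0]), and —
-- unless matrix[0] is empty, in which case no indexing happens — every row index < len(vector)
-- is a valid matrix index and that row is at least len(matrix[0]) wide.
def Pre_vector_matrix_multiply_py (vector : List Int) (matrix : List (List Int)) : Prop :=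
  matrix ≠ [] ∧ ((matrix.headD []).length = 0 ∨
    (vector.length ≤ matrix.length ∧
      ∀ r ∈ matrix.take vector.length, (matrix.headD []).length ≤ r.length))
instance (vector : List Int) (matrix : List (List Int)) : Decidable (Pre_vector_matrix_multiply_py vector matrix) := by unfold Pre_vector_matrix_multiply_py; infer_instance
def pvWitness_vector_matrix_multiply_py : List Int × List (List Int) := ([1, 3], [[1, 0], [1, 1]])
def Spec_vector_matrix_multiply_py (vector : List Int) (matrix : List (List Int)) (out : List Int) : Prop := out = vector_matrix_multiply_py_alt vector matrix
instance (vector : List Int) (matrix : List (List Int)) (out : List Int) : Decidable (Spec_vector_matrix_multiply_py vector matrix out) := by unfold Spec_vector_matrix_multiply_py; infer_instance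

-- ===== CLAIM (what is proved, stated in full; the proofs are below) =====
def Claim_equal_vector_matrix_multiply_py : Prop := ∀ (vector : List Int) (matrix : List (List Int)), Dom_vector_matrix_multiply_py vector matrix → Pre_vector_matrix_multiply_py vector matrix → Spec_vector_matrix_multiply_py vector matrix (vector_matrix_multiply_py vector matrix)

-- ===== LEMMAS AND PROOFS =====

theorem pv_bxor_eq (a b : Int) : PySem.Int.bxor a b = Int.xor a b := by
  cases a <;> cases b <;> simp [PySem.Int.bxor, Int.xor, Int.negSucc_eq] <;> omega

theorem pv_bxor_assoc (a b c : Int) :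
    PySem.Int.bxor (PySem.Int.bxor a b) c = PySem.Int.bxor a (PySem.Int.bxor b c) := by
  simp only [pv_bxor_eq]
  cases a <;> cases b <;> cases c <;> simp [Int.xor, Nat.xor_assoc]

theorem pv_zero_bxor (a : Int) : PySem.Int.bxor 0 a = a := by
  rw [PySem.Int.bxor_comm]; exact PySem.Int.bxor_zero a

-- pull the accumulator out of a XOR fold
theorem pv_foldl_init (g : Nat → Int) (l : List Nat) :
    ∀ a : Int, l.foldl (fun v r => PySem.Int.bxor v (g r)) a
      = PySem.Int.bxor a (l.foldl (fun v r => PySem.Int.bxor v (g r)) 0) := by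
  induction l with
  | nil => intro a; simp [PySem.Int.bxor_zero]
  | cons x l ih =>
      intro a
      simp only [List.foldl_cons]
      rw [ih (PySem.Int.bxor a (g x)), ih (PySem.Int.bxor 0 (g x)),
        pv_zero_bxor, pv_bxor_assoc]

-- a XOR fold over an appended index list splits into the XOR of the two folds
theorem pv_foldl_split (g : Nat → Int) (l₁ l₂ : List Nat) :
    (l₁ ++ l₂).foldl (fun v r => PySem.Int.bxor v (g r)) 0
      = PySem.Int.bxor (l₁.foldl (fun v r => PySem.Int.bxor v (g r)) 0)
                       (l₂.foldl (fun v r => PySem.Int.bxor v (g r)) 0) := by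
  rw [List.foldl_append, pv_foldl_init]

theorem pv_zipWith_map_same {α : Type} (f : Int → Int → Int) (g h : α → Int) (l : List α) :
    List.zipWith f (l.map g) (l.map h) = l.map (fun x => f (g x) (h x)) := by
  induction l with
  | nil => simp
  | cons x l ih => simp [ih]

-- characterisation of B's recursion: entry col of solve lo hi is the XOR over rows lo..hi-1
theorem pvSolve_eq (vector : List Int) (matrix : List (List Int)) (width : Nat) :
    ∀ (n lo hi : Nat), hi - lo = n →
      pvSolve vector matrix width lo hi
        = (List.range width).map (fun col =>
            (List.range' lo n).foldl
              (fun v r => PySem.Int.bxor v (PySem.Int.band (vector.getD r 0) ((matrix.getD r []).getD col 0))) 0) := by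
  intro n
  induction n using Nat.strong_induction_on with
  | _ n ih =>
    intro lo hi h
    rw [pvSolve]
    split_ifs with h0 h1
    · obtain rfl : n = 0 := by omega
      simp [List.map_const']
    · obtain rfl : n = 1 := by omega
      simp [List.range'_one, pv_zero_bxor]
    · rw [ih ((lo + hi) / 2 - lo) (by omega) lo ((lo + hi) / 2) rfl,
          ih (hi - (lo + hi) / 2) (by omega) ((lo + hi) / 2) hi rfl,
          pv_zipWith_map_same]
      apply List.map_congr_left
      intro col _
      rw [show (List.range' lo n)
            = List.range' lo ((lo + hi) / 2 - lo) ++ List.range' ((lo + hi) / 2) (hi - (lo + hi) / 2) by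
          rw [show n = ((lo + hi) / 2 - lo) + (hi - (lo + hi) / 2) by omega,
            ← List.range'_append_1, show lo + ((lo + hi) / 2 - lo) = (lo + hi) / 2 by omega],
        pv_foldl_split]

-- ===== VERDICT (by name: the statement is the Claim_ definition above) =====
theorem vector_matrix_multiply_py_spec : Claim_equal_vector_matrix_multiply_py := by
  intro vector matrix _ _
  unfold Spec_vector_matrix_multiply_py vector_matrix_multiply_py vector_matrix_multiply_py_alt
  dsimp only
  by_cases hw : (matrix.headD []).length = 0
  · rw [if_pos hw, hw]; simp
  · rw [if_neg hw, pvSolve_eq vector matrix _ vector.length 0 vector.length (by omega),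
      List.range_eq_range']
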